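-- pv_equiv track=rewrite | github.com/vedantparmar12/Kanban | mcp-server/src/readme_updater.py | _find_changelog_insert_point
-- ===== SOURCE A (Python) =====
-- from typing import Dict, List, Optional
--
-- def _find_changelog_insert_point(lines: List[str]) -> int:
--     for i, line in enumerate(lines):
--         if line.startswith('## ['):
--             return i
--
--     for i, line in enumerate(lines):
--         if 'changelog' in line.lower():
--             return i + 2
--
--     return len(lines)
-- ===== SOURCE B (Python) =====
-- def _find_changelog_insert_point(lines):
--     changelog_idx = None
--     for i, line in enumerate(lines):
--         if line.startswith('## ['):
--             return i
--         if changelog_idx is None and 'changelog' in line.lower():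
--             changelog_idx = i
--     return changelog_idx + 2 if changelog_idx is not None else len(lines)
-- ===== Notes on version B (the rewrite author's own statement) =====
-- stated objective: simpler
-- what changed: Collapses A's two sequential scans into one pass over enumerate(lines) that returns immediately on a '## [' header and carries the first changelog index in a sentinel for the fallback.
import Mathlib
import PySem

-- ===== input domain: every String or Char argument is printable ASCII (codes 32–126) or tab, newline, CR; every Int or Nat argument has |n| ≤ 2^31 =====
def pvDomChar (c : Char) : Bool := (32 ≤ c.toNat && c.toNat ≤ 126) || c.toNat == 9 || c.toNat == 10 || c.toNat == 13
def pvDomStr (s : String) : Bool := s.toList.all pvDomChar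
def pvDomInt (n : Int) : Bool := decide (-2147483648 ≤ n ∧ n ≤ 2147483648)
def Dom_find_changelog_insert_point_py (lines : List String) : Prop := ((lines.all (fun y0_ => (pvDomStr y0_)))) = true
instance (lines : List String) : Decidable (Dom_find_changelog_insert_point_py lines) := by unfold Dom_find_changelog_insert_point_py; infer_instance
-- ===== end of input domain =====

-- B collapses A's two sequential scans into one pass carrying the fallback index; same result, simpler shape.

-- ===== PORT A =====
-- first loop: for i, line in enumerate(lines): if line.startswith('## ['): return i
def pvA_headerScan (ls : List String) (i : Int) : Option Int :=
  match ls with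
  | [] => none
  | l :: rest => if PySem.Str.startswith l "## [" then some i else pvA_headerScan rest (i + 1)

-- second loop: for i, line in enumerate(lines): if 'changelog' in line.lower(): return i + 2
def pvA_changelogScan (ls : List String) (i : Int) : Option Int :=
  match ls with
  | [] => none
  | l :: rest => if PySem.Str.isIn "changelog" (PySem.Str.lower l) then some i else pvA_changelogScan rest (i + 1)

def find_changelog_insert_point_py (lines : List String) : Int :=
  match pvA_headerScan lines 0 with
  | some i => i
  | none =>
    match pvA_changelogScan lines 0 with
    | some i => i + 2
    | none => (lines.length : Int)

-- ===== PORT B =====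
-- single pass: return i at a '## [' header; record the first changelog index in the sentinel
def pvB_loop (ls : List String) (i : Int) (changelogIdx : Option Int) : Int :=
  match ls with
  | [] => match changelogIdx with
          | some j => j + 2
          | none => i
  | l :: rest =>
    if PySem.Str.startswith l "## [" then i
    else
      pvB_loop rest (i + 1)
        (if changelogIdx.isNone && PySem.Str.isIn "changelog" (PySem.Str.lower l) then some i else changelogIdx)

def find_changelog_insert_point_py_alt (lines : List String) : Int :=
  pvB_loop lines 0 none

-- ===== PRECONDITION & SPEC =====
def Spec_find_changelog_insert_point_py (lines : List String) (out : Int) : Prop := out = find_changelog_insert_point_py_alt lines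
instance (lines : List String) (out : Int) : Decidable (Spec_find_changelog_insert_point_py lines out) := by unfold Spec_find_changelog_insert_point_py; infer_instance

-- ===== CLAIM (what is proved, stated in full; the proofs are below) =====
def Claim_equal_find_changelog_insert_point_py : Prop := ∀ (lines : List String), Dom_find_changelog_insert_point_py lines → Spec_find_changelog_insert_point_py lines (find_changelog_insert_point_py lines)

-- ===== LEMMAS AND PROOFS =====

-- with the sentinel set, B ignores further changelog lines: only the header scan matters
theorem pvB_loop_some (ls : List String) (j : Int) : ∀ (i : Int),
    pvB_loop ls i (some j) =
      match pvA_headerScan ls i with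
      | some k => k
      | none => j + 2 := by
  induction ls with
  | nil => intro i; simp [pvB_loop, pvA_headerScan]
  | cons l rest ih =>
    intro i
    simp only [pvB_loop, pvA_headerScan, Option.isNone]
    by_cases h : PySem.Chars.startswith l.toList ['#', '#', ' ', '['] = true
    · simp [h]
    · simp [h, ih]

-- with the sentinel unset, B computes A's header-scan-then-changelog-scan value
theorem pvB_loop_none (ls : List String) : ∀ (i : Int),
    pvB_loop ls i none =
      match pvA_headerScan ls i with
      | some k => k
      | none =>
        match pvA_changelogScan ls i with
        | some k => k + 2
        | none => i + ls.length := by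
  induction ls with
  | nil => intro i; simp [pvB_loop, pvA_headerScan, pvA_changelogScan]
  | cons l rest ih =>
    intro i
    simp only [pvB_loop, pvA_headerScan, pvA_changelogScan, Option.isNone]
    by_cases h : PySem.Chars.startswith l.toList ['#', '#', ' ', '['] = true
    · simp [h]
    · by_cases hc : PySem.Chars.isIn ['c', 'h', 'a', 'n', 'g', 'e', 'l', 'o', 'g'] (PySem.Chars.lower l.toList) = true
      · simp [h, hc, pvB_loop_some]
      · rcases hh : pvA_headerScan rest (i + 1) with _ | k
        · rcases hcc : pvA_changelogScan rest (i + 1) with _ | k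
          · simp [h, hc, ih, hh, hcc]; ring
          · simp [h, hc, ih, hh, hcc]
        · simp [h, hc, ih, hh]

theorem find_changelog_insert_point_py_spec : Claim_equal_find_changelog_insert_point_py := by
  intro lines _
  unfold Spec_find_changelog_insert_point_py find_changelog_insert_point_py find_changelog_insert_point_py_alt
  rw [pvB_loop_none]
  rcases pvA_headerScan lines 0 with _ | k
  · rcases pvA_changelogScan lines 0 with _ | k <;> simp
  · rfl
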